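-- pv_equiv track=rewrite | github.com/pedrofariacomposer/morrisoop | more_functions.py | find_unique_sublists
-- ===== SOURCE A (Python) =====
-- def find_unique_sublists(main_list, num_sublists_to_select):
--     selected_sublists = []
--
--     for sublist in main_list:
--         all_strings = set(sublist)
--         unique_strings = all_strings - set().union(*selected_sublists)
--
--         if len(unique_strings) >= 4:
--             selected_sublists.append(sublist)
--
--         if len(selected_sublists) == num_sublists_to_select:
--             break
--
--     if len(selected_sublists) != num_sublists_to_select:
--         return None
--     return selected_sublists
-- ===== SOURCE B (Python) =====
-- def find_unique_sublists(main_list, num_sublists_to_select):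
--     def go(items, needed, seen):
--         if not items:
--             return [] if needed == 0 else None
--         head, rest = items[0], items[1:]
--         fresh = sum(1 for s in set(head) if s not in seen)
--         if fresh >= 4:
--             if needed == 1:
--                 return [head]
--             tail = go(rest, needed - 1, seen.union(head))
--             return None if tail is None else [head] + tail
--         if needed == 0:
--             return []
--         return go(rest, needed, seen)
--     return go(main_list, num_sublists_to_select, set())
-- ===== Notes on version B (the rewrite author's own statement) =====
-- stated objective: alternative
-- what changed: B is a single early-returning pass that keeps one incrementally grown seen-set and a decrementing needed-counter and builds the answer directly, instead of A's loop that re-unions all selected sublists from scratch every iteration and re-checks the accumulated length at the end; it trades A's repeated re-union for maintaining the union incrementally.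
import Mathlib
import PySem

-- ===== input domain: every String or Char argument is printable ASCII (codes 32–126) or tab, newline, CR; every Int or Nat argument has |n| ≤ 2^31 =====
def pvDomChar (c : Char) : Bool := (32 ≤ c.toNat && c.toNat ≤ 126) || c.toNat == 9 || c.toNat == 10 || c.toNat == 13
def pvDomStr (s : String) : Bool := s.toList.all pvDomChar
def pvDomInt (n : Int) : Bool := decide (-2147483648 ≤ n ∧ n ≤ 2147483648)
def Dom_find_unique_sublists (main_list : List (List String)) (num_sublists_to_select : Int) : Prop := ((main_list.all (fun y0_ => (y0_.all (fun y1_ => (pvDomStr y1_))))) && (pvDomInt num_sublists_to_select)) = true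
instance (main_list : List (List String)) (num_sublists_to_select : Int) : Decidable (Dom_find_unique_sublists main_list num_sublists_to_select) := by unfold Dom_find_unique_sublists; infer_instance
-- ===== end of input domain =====

-- B replaces A's accumulator loop (which re-unions all selected sublists every iteration and
-- length-checks at the end) by one early-returning pass with a decrementing needed-counter and
-- an incrementally grown seen-set (objective: alternative).


-- ===== PORT A =====
-- set().union(*selected_sublists): the empty set updated with each selected sublist in order
def pvUnionA (sel : List (List String)) : PySem.Set String :=
  sel.foldl (fun acc l => PySem.Set.update acc l) PySem.Set.empty

def pvLoopA (rest : List (List String)) (num : Int) (sel : List (List String)) : List (List String) :=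
  match rest with
  | [] => sel
  | sub :: rest =>
    let all_strings := PySem.Set.ofList sub
    let unique_strings := PySem.Set.diff all_strings (pvUnionA sel)
    let sel' := if 4 ≤ PySem.Set.len unique_strings then sel ++ [sub] else sel
    if (sel'.length : Int) = num then sel' else pvLoopA rest num sel'

def find_unique_sublists (main_list : List (List String)) (num_sublists_to_select : Int) : Option (List (List String)) :=
  let selected := pvLoopA main_list num_sublists_to_select []
  if (selected.length : Int) ≠ num_sublists_to_select then none else some selected

-- ===== PORT B =====
def pvGoB (items : List (List String)) (result : List (List String)) (needed : Int) (seen : PySem.Set String) : Option (List (List String)) :=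
  match items with
  | [] => if needed = 0 then some result else none
  | head :: rest =>
    let fresh := PySem.Set.len (PySem.Set.diff (PySem.Set.ofList head) seen)
    if 4 ≤ fresh then
      if needed = 1 then some (result ++ [head])
      else pvGoB rest (result ++ [head]) (needed - 1) (PySem.Set.update seen head)
    else if needed = 0 then some result
    else pvGoB rest result needed seen

def find_unique_sublists_alt (main_list : List (List String)) (num_sublists_to_select : Int) : Option (List (List String)) :=
  pvGoB main_list [] num_sublists_to_select PySem.Set.empty

-- ===== PRECONDITION & SPEC =====
def Spec_find_unique_sublists (main_list : List (List String)) (num_sublists_to_select : Int) (out : Option (List (List String))) : Prop := out = find_unique_sublists_alt main_list num_sublists_to_select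
instance (main_list : List (List String)) (num_sublists_to_select : Int) (out : Option (List (List String))) : Decidable (Spec_find_unique_sublists main_list num_sublists_to_select out) := by unfold Spec_find_unique_sublists; infer_instance

-- ===== CLAIM =====
def Claim_equal_find_unique_sublists : Prop := ∀ (main_list : List (List String)) (num_sublists_to_select : Int), Dom_find_unique_sublists main_list num_sublists_to_select → Spec_find_unique_sublists main_list num_sublists_to_select (find_unique_sublists main_list num_sublists_to_select)

-- ===== LEMMAS AND PROOFS =====
lemma pv_unionA_append (sel : List (List String)) (sub : List String) :
    pvUnionA (sel ++ [sub]) = PySem.Set.update (pvUnionA sel) sub := by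
  simp [pvUnionA, List.foldl_append]

-- Main invariant: B's loop continued from (result, needed, seen) finishes exactly as A's loop
-- plus A's final length test would.
lemma pv_loop_eq (rest : List (List String)) (num : Int) (sel : List (List String)) :
    (if ((pvLoopA rest num sel).length : Int) = num then some (pvLoopA rest num sel) else none)
      = pvGoB rest sel (num - sel.length) (pvUnionA sel) := by
  induction rest generalizing sel with
  | nil =>
    by_cases h : (sel.length : Int) = num
    · have h0 : num - (sel.length : Int) = 0 := by omega
      simp [pvLoopA, pvGoB, h]
    · have h0 : num - (sel.length : Int) ≠ 0 := by omega
      simp [pvLoopA, pvGoB, h, h0]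
  | cons head rest ih =>
    rw [pvGoB]
    simp only [pvLoopA]
    by_cases h4 : 4 ≤ PySem.Set.len (PySem.Set.diff (PySem.Set.ofList head) (pvUnionA sel))
    · rw [if_pos h4, if_pos h4]
      by_cases h1 : num - (sel.length : Int) = 1
      · have hl : ((sel ++ [head]).length : Int) = num := by
          simp; omega
        rw [if_pos h1, if_pos hl, if_pos hl]
      · have hl : ((sel ++ [head]).length : Int) ≠ num := by
          simp; omega
        have harg : num - (sel.length : Int) - 1 = num - ((sel ++ [head]).length : Int) := by
          simp; omega
        rw [if_neg h1, if_neg hl, harg, ← pv_unionA_append]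
        exact ih (sel ++ [head])
    · rw [if_neg h4, if_neg h4]
      by_cases h0 : num - (sel.length : Int) = 0
      · have hl : ((sel : List (List String)).length : Int) = num := by omega
        rw [if_pos h0, if_pos hl, if_pos hl]
      · have hl : ((sel : List (List String)).length : Int) ≠ num := by omega
        rw [if_neg h0, if_neg hl]
        exact ih sel

-- ===== VERDICT =====
theorem find_unique_sublists_spec : Claim_equal_find_unique_sublists := by
  intro main_list num _
  unfold Spec_find_unique_sublists find_unique_sublists find_unique_sublists_alt
  have h := pv_loop_eq main_list num []
  simp only [List.length_nil, Int.natCast_zero, sub_zero] at h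
  show (if ((pvLoopA main_list num []).length : Int) ≠ num then none
        else some (pvLoopA main_list num [])) = pvGoB main_list [] num PySem.Set.empty
  by_cases hfin : ((pvLoopA main_list num []).length : Int) = num
  · rw [if_pos hfin] at h
    rw [if_neg (not_not_intro hfin)]
    exact h
  · rw [if_neg hfin] at h
    rw [if_pos hfin]
    exact h
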